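-- pv_equiv track=rewrite | github.com/brendabaek/leetcode_s | 202510/easy/20251022_3712.py | sumDivisibleByK
-- ===== SOURCE A (Python) =====
-- from typing import List
--
-- def sumDivisibleByK(nums: List[int], k: int) -> int:
--     dics, ans = {}, 0
--     for num in nums:
--         try: dics[num] += 1
--         except: dics[num] = 1
--     for key, v in dics.items():
--         if v % k == 0: ans += key * v
--     return ans
-- ===== SOURCE B (Python) =====
-- from typing import List
--
-- def sumDivisibleByK(nums: List[int], k: int) -> int:
--     s = sorted(nums)
--     ans, i, n = 0, 0, len(s)
--     while i < n:
--         j = i + 1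
--         while j < n and s[j] == s[i]:
--             j += 1
--         if (j - i) % k == 0:
--             ans += s[i] * (j - i)
--         i = j
--     return ans
-- ===== Notes on version B (the rewrite author's own statement) =====
-- stated objective: alternative
-- what changed: Replaces A's dict-counter pass plus items loop by sorting a copy and scanning runs of equal consecutive values in one pass, adding value*runlength when the run length is divisible by k.
import Mathlib
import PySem

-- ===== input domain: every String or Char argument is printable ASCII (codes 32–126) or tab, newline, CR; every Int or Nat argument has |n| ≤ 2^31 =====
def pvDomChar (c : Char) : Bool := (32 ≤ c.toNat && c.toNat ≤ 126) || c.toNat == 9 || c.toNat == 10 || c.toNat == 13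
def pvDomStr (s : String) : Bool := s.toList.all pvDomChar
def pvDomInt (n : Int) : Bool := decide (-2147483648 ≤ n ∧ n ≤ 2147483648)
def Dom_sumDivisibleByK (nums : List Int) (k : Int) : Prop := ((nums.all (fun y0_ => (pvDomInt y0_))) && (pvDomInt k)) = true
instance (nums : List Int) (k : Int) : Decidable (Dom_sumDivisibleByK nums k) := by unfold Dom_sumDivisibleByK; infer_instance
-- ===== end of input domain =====

-- B replaces A's hash-counter pass by sort + one scan over runs of equal values (alternative decomposition, same result).

-- ===== PORT A =====
-- counter dict built by the first loop (try/except increment), then the items loop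
def sumDivisibleByK (nums : List Int) (k : Int) : Int :=
  let dics := nums.foldl (fun d num => d.insert num (d.getD num 0 + 1)) PySem.Dict.empty
  dics.items.foldl (fun ans kv => if PySem.Int.mod kv.2 k = 0 then ans + kv.1 * kv.2 else ans) 0

-- ===== PORT B =====
-- the outer while loop of Source B: each step consumes one run of equal values of the sorted list
def sumDivK_runs (k : Int) : List Int → Int → Int
  | [], ans => ans
  | x :: rest, ans =>
    let cnt : Int := (rest.takeWhile (fun y => y == x)).length + 1
    sumDivK_runs k (rest.dropWhile (fun y => y == x))
      (if PySem.Int.mod cnt k = 0 then ans + x * cnt else ans)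
termination_by l _ => l.length
decreasing_by
  exact Nat.lt_succ_of_le ((List.dropWhile_sublist _).length_le)

def sumDivisibleByK_alt (nums : List Int) (k : Int) : Int :=
  sumDivK_runs k (PySem.List.sorted nums (fun x => x) false) 0

-- ===== PRECONDITION & SPEC =====
-- Pre_ excludes exactly the inputs where Python A raises ZeroDivisionError: k = 0 with a non-empty list.
def Pre_sumDivisibleByK (nums : List Int) (k : Int) : Prop := nums = [] ∨ k ≠ 0
instance (nums : List Int) (k : Int) : Decidable (Pre_sumDivisibleByK nums k) := by unfold Pre_sumDivisibleByK; infer_instance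
def pvWitness_sumDivisibleByK : List Int × Int := ([1, 2, 2, 3, 3, 3], 3)

def Spec_sumDivisibleByK (nums : List Int) (k : Int) (out : Int) : Prop := out = sumDivisibleByK_alt nums k
instance (nums : List Int) (k : Int) (out : Int) : Decidable (Spec_sumDivisibleByK nums k out) := by unfold Spec_sumDivisibleByK; infer_instance

-- ===== CLAIM (what is proved, stated in full; the proofs are below) =====
def Claim_equal_sumDivisibleByK : Prop := ∀ (nums : List Int) (k : Int), Dom_sumDivisibleByK nums k → Pre_sumDivisibleByK nums k → Spec_sumDivisibleByK nums k (sumDivisibleByK nums k)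

-- ===== LEMMAS AND PROOFS =====

-- the contribution of one value v occurring c times
def sdTerm (k v c : Int) : Int := if PySem.Int.mod c k = 0 then v * c else 0

-- the canonical value both programs compute: sum of sdTerm over the distinct values of l with their counts
def sdSum (k : Int) (l : List Int) : Int :=
  ((PySem.Set.ofList l).map (fun v => sdTerm k v (l.count v))).sum

theorem sd_foldl_if_add (l : List (Int × Int)) (k a : Int) :
    l.foldl (fun ans kv => if PySem.Int.mod kv.2 k = 0 then ans + kv.1 * kv.2 else ans) a
      = a + (l.map (fun kv => sdTerm k kv.1 kv.2)).sum := by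
  induction l generalizing a with
  | nil => simp
  | cons h t ih =>
    simp only [List.foldl_cons, List.map_cons, List.sum_cons, ih, sdTerm]
    split_ifs <;> ring

theorem sd_A_eq (nums : List Int) (k : Int) : sumDivisibleByK nums k = sdSum k nums := by
  unfold sumDivisibleByK sdSum
  simp only [PySem.Dict.foldl_insert_getD_add_one_eq_counter, PySem.Dict.items_counter,
    sd_foldl_if_add]
  simp [List.map_map, Function.comp_def]

-- permutation of two nodup lists with the same members
theorem perm_of_nodup_mem_iff {l₁ l₂ : List Int} (h₁ : l₁.Nodup) (h₂ : l₂.Nodup)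
    (h : ∀ a, a ∈ l₁ ↔ a ∈ l₂) : l₁.Perm l₂ := by
  apply List.perm_iff_count.mpr
  intro a
  by_cases ha : a ∈ l₁
  · rw [List.count_eq_one_of_mem h₁ ha, List.count_eq_one_of_mem h₂ ((h a).mp ha)]
  · rw [List.count_eq_zero_of_not_mem ha,
      List.count_eq_zero_of_not_mem (fun hb => ha ((h a).mpr hb))]

theorem sdSum_perm (k : Int) {l₁ l₂ : List Int} (hp : l₁.Perm l₂) : sdSum k l₁ = sdSum k l₂ := by
  unfold sdSum
  have hmem : ∀ a, a ∈ PySem.Set.ofList l₁ ↔ a ∈ PySem.Set.ofList l₂ := by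
    intro a; simp [PySem.Set.mem_ofList, hp.mem_iff]
  have hsets : (PySem.Set.ofList l₁ : List Int).Perm (PySem.Set.ofList l₂) :=
    perm_of_nodup_mem_iff (PySem.Set.nodup_ofList l₁) (PySem.Set.nodup_ofList l₂) hmem
  calc ((PySem.Set.ofList l₁).map (fun v => sdTerm k v (l₁.count v))).sum
      = ((PySem.Set.ofList l₁).map (fun v => sdTerm k v (l₂.count v))).sum := by
        rw [List.map_congr_left]; intro a _; rw [hp.count_eq]
    _ = ((PySem.Set.ofList l₂).map (fun v => sdTerm k v (l₂.count v))).sum :=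
        (hsets.map _).sum_eq

-- in a sorted list bounded below by x, everything after dropping the leading x's is strictly above x
theorem gt_of_mem_dropWhile (x : Int) (l : List Int) (hp : l.Pairwise (· ≤ ·))
    (hlb : ∀ y ∈ l, x ≤ y) : ∀ y ∈ l.dropWhile (fun y => y == x), x < y := by
  induction l with
  | nil => simp
  | cons r rs ih =>
    obtain ⟨h1, h2⟩ := List.pairwise_cons.mp hp
    intro y hy
    rw [List.dropWhile_cons] at hy
    by_cases hr : r = x
    · simp only [hr, beq_self_eq_true, if_true] at hy
      exact ih h2 (fun z hz => hlb z (List.mem_cons_of_mem _ hz)) y hy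
    · simp only [beq_iff_eq, hr, if_false] at hy
      have hxr : x < r := lt_of_le_of_ne (hlb r List.mem_cons_self) (Ne.symm hr)
      rcases List.mem_cons.mp hy with rfl | hys
      · exact hxr
      · exact lt_of_lt_of_le hxr (h1 y hys)

-- one run of the sorted list peels off exactly one distinct value's contribution
theorem sdSum_cons_run (k x : Int) (rest : List Int) (hs : (x :: rest).Pairwise (· ≤ ·)) :
    sdSum k (x :: rest)
      = sdTerm k x ((rest.takeWhile (fun y => y == x)).length + 1)
        + sdSum k (rest.dropWhile (fun y => y == x)) := by
  obtain ⟨hlb, hpr⟩ := List.pairwise_cons.mp hs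
  set t := rest.takeWhile (fun y => y == x) with ht
  set d := rest.dropWhile (fun y => y == x) with hd
  have hrest : t ++ d = rest := List.takeWhile_append_dropWhile
  have htx : ∀ y ∈ t, y = x := by
    intro y hy
    simpa using List.mem_takeWhile_imp hy
  have hdgt : ∀ y ∈ d, x < y := gt_of_mem_dropWhile x rest hpr hlb
  have hxd : x ∉ d := fun h => lt_irrefl x (hdgt x h)
  have hcx : (x :: rest).count x = t.length + 1 := by
    rw [← hrest, List.count_cons_self, List.count_append,
      List.count_eq_length.mpr (fun b hb => (htx b hb).symm),
      List.count_eq_zero.mpr hxd]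
  have hcv : ∀ v ∈ d, (x :: rest).count v = d.count v := by
    intro v hv
    have hvx : v ≠ x := fun h => lt_irrefl x (h ▸ hdgt v hv)
    rw [← hrest]
    simp [List.count_append, hvx.symm,
      List.count_eq_zero.mpr (fun hvt => hvx (htx v hvt))]
  have hmem : ∀ a, a ∈ (x :: (PySem.Set.ofList d : List Int)) ↔ a ∈ (PySem.Set.ofList (x :: rest) : List Int) := by
    intro a
    simp only [List.mem_cons, PySem.Set.mem_ofList, ← hrest, List.mem_append]
    constructor
    · rintro (rfl | h)
      · exact Or.inl rfl
      · exact Or.inr (Or.inr h)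
    · rintro (rfl | h | h)
      · exact Or.inl rfl
      · exact Or.inl (htx a h)
      · exact Or.inr h
  have hset : (x :: (PySem.Set.ofList d : List Int)).Perm (PySem.Set.ofList (x :: rest)) :=
    perm_of_nodup_mem_iff (List.nodup_cons.mpr ⟨by simpa [PySem.Set.mem_ofList] using hxd,
      PySem.Set.nodup_ofList d⟩) (PySem.Set.nodup_ofList _) hmem
  unfold sdSum
  rw [← (hset.map (fun v => sdTerm k v ((x :: rest).count v))).sum_eq, List.map_cons,
    List.sum_cons, hcx]
  congr 1
  exact congrArg List.sum (List.map_congr_left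
    (fun a ha => by rw [hcv a (by simpa [PySem.Set.mem_ofList] using ha)]))

theorem sd_runs_eq (k : Int) : ∀ (n : Nat) (s : List Int), s.length ≤ n →
    s.Pairwise (· ≤ ·) → ∀ ans, sumDivK_runs k s ans = ans + sdSum k s := by
  intro n
  induction n with
  | zero =>
    intro s hlen _ ans
    rw [List.length_eq_zero_iff.mp (Nat.le_zero.mp hlen)]
    simp [sumDivK_runs, sdSum, PySem.Set.ofList]
  | succ n ih =>
    intro s hlen hs ans
    match s with
    | [] => simp [sumDivK_runs, sdSum, PySem.Set.ofList]
    | x :: rest =>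
      rw [sumDivK_runs, ih (rest.dropWhile (fun y => y == x))
          (le_trans (List.dropWhile_sublist _).length_le (Nat.le_of_succ_le_succ hlen))
          ((List.pairwise_cons.mp hs).2.sublist (List.dropWhile_sublist _)),
        sdSum_cons_run k x rest hs]
      unfold sdTerm
      split_ifs <;> ring

theorem sd_B_eq (nums : List Int) (k : Int) : sumDivisibleByK_alt nums k = sdSum k nums := by
  unfold sumDivisibleByK_alt
  have hperm : (PySem.List.sorted nums (fun x => x) false).Perm nums := PySem.List.sorted_perm nums _ _
  rw [sd_runs_eq k _ _ le_rfl (by simpa using PySem.List.sorted_pairwise nums (fun x => x)) 0,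
    sdSum_perm k hperm]
  ring

-- ===== VERDICT (by name: the statement is the Claim_ definition above) =====
theorem sumDivisibleByK_spec : Claim_equal_sumDivisibleByK := by
  intro nums k _ _
  unfold Spec_sumDivisibleByK
  rw [sd_A_eq, sd_B_eq]
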